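-- pv_equiv track=rewrite | github.com/CreeperHK/Screen_Mahjong | capture.py | str_to_maj
-- ===== SOURCE A (Python) =====
-- def str_to_maj(s):
--     lists = {
--         'm': [],
--         's': [],
--         'p': [],
--         'z': []
--     }
--
--     for i in range(0, len(s), 2):
--         char = s[i + 1]
--         number = s[i]
--
--         if char in lists:
--             lists[char].append(number)
--
--     return_str = ''
--
--     if lists['m'] != []:
--         m_str = ''.join(lists['m'])
--         return_str += m_str + 'm'
--     if lists['p'] != []:
--         p_str = ''.join(lists['p'])
--         return_str += p_str + 'p'
--     if lists['s'] != []: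
--         s_str = ''.join(lists['s'])
--         return_str += s_str + 's'
--     if lists['z'] != []:
--         z_str = ''.join(lists['z'])
--         return_str += z_str + 'z'
--
--     return return_str
-- ===== SOURCE B (Python) =====
-- def str_to_maj(s):
--     parts = []
--     for suit in 'mpsz':
--         nums = [s[i] for i in range(0, len(s), 2) if s[i + 1] == suit]
--         if nums:
--             parts.append(''.join(nums) + suit)
--     return ''.join(parts)
-- ===== Notes on version B (the rewrite author's own statement) =====
-- stated objective: simpler
-- what changed: B makes four independent passes over the string, one per suit letter in the fixed m-p-s-z order, collecting the number characters whose following character matches that suit, instead of A's single pass that builds a dict of per-suit lists and then assembles the result from it; no grouping structure is maintained.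
import Mathlib
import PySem

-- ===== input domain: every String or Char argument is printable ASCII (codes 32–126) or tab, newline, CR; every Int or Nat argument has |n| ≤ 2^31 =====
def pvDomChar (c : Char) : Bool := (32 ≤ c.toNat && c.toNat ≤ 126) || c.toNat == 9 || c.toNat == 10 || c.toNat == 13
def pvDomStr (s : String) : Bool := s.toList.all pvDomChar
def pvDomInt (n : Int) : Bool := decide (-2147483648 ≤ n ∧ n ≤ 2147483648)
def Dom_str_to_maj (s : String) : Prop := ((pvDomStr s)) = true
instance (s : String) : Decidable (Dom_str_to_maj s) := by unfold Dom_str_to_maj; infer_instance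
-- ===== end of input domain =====

-- B groups by four independent passes over the string (one per suit letter) instead of
-- building a dict of per-suit lists in one pass; objective: simpler/alternative, not faster.

-- ===== PORT A =====
def str_to_maj (s : String) : String :=
  let cs := s.toList
  let lists0 : PySem.Dict Char (List Char) :=
    ((((PySem.Dict.empty).insert 'm' []).insert 's' []).insert 'p' []).insert 'z' []
  let lists := (PySem.List.pyRange 0 (PySem.List.len cs) 2).foldl (fun d i =>
    match PySem.List.pyGet? cs (i + 1), PySem.List.pyGet? cs i with
    | some ch, some num =>
        if d.contains ch then d.modify ch [] (fun l => l ++ [num]) else d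
    | _, _ => d) lists0
  let r0 : List Char := []
  let r1 := if lists.getD 'm' [] ≠ [] then r0 ++ lists.getD 'm' [] ++ ['m'] else r0
  let r2 := if lists.getD 'p' [] ≠ [] then r1 ++ lists.getD 'p' [] ++ ['p'] else r1
  let r3 := if lists.getD 's' [] ≠ [] then r2 ++ lists.getD 's' [] ++ ['s'] else r2
  let r4 := if lists.getD 'z' [] ≠ [] then r3 ++ lists.getD 'z' [] ++ ['z'] else r3
  String.ofList r4

-- ===== PORT B =====
def str_to_maj_alt (s : String) : String :=
  let cs := s.toList
  let out := (['m', 'p', 's', 'z'] : List Char).foldl (fun acc suit =>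
    let nums := (PySem.List.pyRange 0 (PySem.List.len cs) 2).foldl (fun ns i =>
      match PySem.List.pyGet? cs (i + 1) with
      | some c =>
          if c = suit then
            (match PySem.List.pyGet? cs i with
             | some num => ns ++ [num]
             | none => ns)
          else ns
      | none => ns) ([] : List Char)
    if nums ≠ [] then acc ++ (nums ++ [suit]) else acc) ([] : List Char)
  String.ofList out

-- ===== PRECONDITION & SPEC =====
-- A (and B) raise IndexError at s[i+1] when the string has odd length; Pre_ excludes exactly those.
def Pre_str_to_maj (s : String) : Prop := s.toList.length % 2 = 0
instance (s : String) : Decidable (Pre_str_to_maj s) := by unfold Pre_str_to_maj; infer_instance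
def pvWitness_str_to_maj : String := "1m2p"
def Spec_str_to_maj (s : String) (out : String) : Prop := out = str_to_maj_alt s
instance (s : String) (out : String) : Decidable (Spec_str_to_maj s out) := by unfold Spec_str_to_maj; infer_instance

-- ===== CLAIM (what is proved, stated in full; the proofs are below) =====
def Claim_equal_str_to_maj : Prop := ∀ (s : String), Dom_str_to_maj s → Pre_str_to_maj s → Spec_str_to_maj s (str_to_maj s)

-- ===== LEMMAS AND PROOFS =====

-- On an even-length string every index drawn from range(0, len, 2) and its successor are in range.
theorem pv_get_some (cs : List Char) (h : cs.length % 2 = 0) (i : Int)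
    (hi : i ∈ PySem.List.pyRange 0 (PySem.List.len cs) 2) :
    PySem.List.pyGet? cs i = some (PySem.List.pyGetD cs i ' ') ∧
    PySem.List.pyGet? cs (i + 1) = some (PySem.List.pyGetD cs (i + 1) ' ') := by
  rw [PySem.List.mem_pyRange_iff_of_pos (by norm_num)] at hi
  rw [PySem.List.len_eq] at hi
  obtain ⟨h0, hlt, hdvd⟩ := hi
  have hlt' : i + 1 < (cs.length : Int) := by omega
  have h0' : (0:Int) ≤ i + 1 := by omega
  constructor
  · rw [PySem.List.pyGet?_eq_some_getElem cs h0 hlt, PySem.List.pyGetD_eq_getElem cs ' ' h0 hlt]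
  · rw [PySem.List.pyGet?_eq_some_getElem cs h0' hlt', PySem.List.pyGetD_eq_getElem cs ' ' h0' hlt']

-- the (suit, number) pairs the loop visits
def pvPairs (cs : List Char) : List (Char × Char) :=
  (PySem.List.pyRange 0 (PySem.List.len cs) 2).map
    (fun i => (PySem.List.pyGetD cs (i + 1) ' ', PySem.List.pyGetD cs i ' '))

def pvSuits : List Char := ['m', 's', 'p', 'z']

-- A's guarded fold over a dict whose keys are exactly the four suits equals the
-- unguarded modify-fold over the pairs whose suit is one of the four keys.
theorem pv_guarded_fold (l : List (Char × Char)) (d : PySem.Dict Char (List Char))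
    (hk : ∀ c : Char, d.contains c = decide (c ∈ pvSuits)) :
    l.foldl (fun d p => if d.contains p.1 then d.modify p.1 [] (fun l => l ++ [p.2]) else d) d =
    (l.filter (fun p => decide (p.1 ∈ pvSuits))).foldl
      (fun d p => d.modify p.1 [] (fun l => l ++ [p.2])) d := by
  induction l generalizing d with
  | nil => rfl
  | cons p t ih =>
      by_cases hp : p.1 ∈ pvSuits
      · have hc : d.contains p.1 = true := by rw [hk]; simp [hp]
        simp only [List.foldl_cons, List.filter_cons, hp, decide_true, if_pos hc, if_true]
        exact ih _ (fun c => by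
          rw [PySem.Dict.contains_modify, hk]
          by_cases hcp : c = p.1 <;> simp [hcp, hp])
      · have hc : d.contains p.1 = false := by rw [hk]; simp [hp]
        simp only [List.foldl_cons, List.filter_cons, hp, decide_false, hc]
        simpa using ih _ hk

theorem pv_init_keys : ∀ c : Char,
    (((((PySem.Dict.empty : PySem.Dict Char (List Char)).insert 'm' []).insert 's' []).insert
      'p' []).insert 'z' []).contains c = decide (c ∈ pvSuits) := by
  intro c
  simp only [PySem.Dict.contains_insert, PySem.Dict.contains_empty, pvSuits, List.mem_cons,
    List.not_mem_nil, or_false]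
  by_cases h1 : c = 'm' <;> by_cases h2 : c = 's' <;> by_cases h3 : c = 'p' <;>
    by_cases h4 : c = 'z' <;> simp [h1, h2, h3, h4]

theorem pv_dict_getD (cs : List Char) (h : cs.length % 2 = 0) (c : Char) (hc : c ∈ pvSuits) :
    ((PySem.List.pyRange 0 (PySem.List.len cs) 2).foldl (fun d i =>
      match PySem.List.pyGet? cs (i + 1), PySem.List.pyGet? cs i with
      | some ch, some num =>
          if d.contains ch then d.modify ch [] (fun l => l ++ [num]) else d
      | _, _ => d)
      (((((PySem.Dict.empty).insert 'm' []).insert 's' []).insert 'p' []).insert 'z' [])).getD c []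
    = ((pvPairs cs).filter (fun p => p.1 == c)).map (fun p => p.2) := by
  have hfold : (pvPairs cs).foldl
      (fun d p => if d.contains p.1 then d.modify p.1 [] (fun l => l ++ [p.2]) else d)
      (((((PySem.Dict.empty).insert 'm' []).insert 's' []).insert 'p' []).insert 'z' [])
      = (PySem.List.pyRange 0 (PySem.List.len cs) 2).foldl
        (fun d i => if d.contains (PySem.List.pyGetD cs (i + 1) ' ')
          then d.modify (PySem.List.pyGetD cs (i + 1) ' ') []
            (fun l => l ++ [PySem.List.pyGetD cs i ' '])
          else d)
        (((((PySem.Dict.empty).insert 'm' []).insert 's' []).insert 'p' []).insert 'z' []) := by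
    rw [pvPairs, List.foldl_map]
  rw [PySem.List.foldl_congr_mem _ _
    (fun d i => if d.contains (PySem.List.pyGetD cs (i + 1) ' ')
      then d.modify (PySem.List.pyGetD cs (i + 1) ' ') [] (fun l => l ++ [PySem.List.pyGetD cs i ' '])
      else d) _
    (by
      intro acc x hx
      obtain ⟨h1, h2⟩ := pv_get_some cs h x hx
      rw [h1, h2])]
  rw [← hfold, pv_guarded_fold (pvPairs cs) _ pv_init_keys,
    PySem.Dict.getD_foldl_modify_append]
  have hinit : (((((PySem.Dict.empty : PySem.Dict Char (List Char)).insert 'm' []).insert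
      's' []).insert 'p' []).insert 'z' []).getD c [] = [] := by
    fin_cases hc <;> rfl
  rw [hinit, List.nil_append, List.filter_filter]
  congr 1
  apply List.filter_congr
  intro p _
  by_cases hpc : p.1 = c
  · simp [hpc, hc]
  · simp [hpc]

theorem pv_b_nums (cs : List Char) (h : cs.length % 2 = 0) (suit : Char) :
    ((PySem.List.pyRange 0 (PySem.List.len cs) 2).foldl (fun ns i =>
      match PySem.List.pyGet? cs (i + 1) with
      | some c =>
          if c = suit then
            (match PySem.List.pyGet? cs i with
             | some num => ns ++ [num]
             | none => ns)
          else ns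
      | none => ns) ([] : List Char))
    = ((pvPairs cs).filter (fun p => p.1 == suit)).map (fun p => p.2) := by
  have hB := PySem.List.foldl_append_if (fun p : Char × Char => p.1 == suit)
    (fun p => p.2) (pvPairs cs) []
  rw [List.nil_append] at hB
  rw [PySem.List.foldl_congr_mem _ _
    (fun ns i => if (PySem.List.pyGetD cs (i + 1) ' ') = suit
      then ns ++ [PySem.List.pyGetD cs i ' '] else ns) _
    (by
      intro acc x hx
      obtain ⟨h1, h2⟩ := pv_get_some cs h x hx
      rw [h1, h2]), ← hB, pvPairs, List.foldl_map]
  apply PySem.List.foldl_congr_mem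
  intro acc x _
  simp

-- ===== VERDICT (by name: the statement is the Claim_ definition above) =====
theorem str_to_maj_spec : Claim_equal_str_to_maj := by
  intro s _ hpre
  unfold Spec_str_to_maj str_to_maj str_to_maj_alt
  have hm := pv_dict_getD s.toList hpre 'm' (by decide)
  have hs := pv_dict_getD s.toList hpre 's' (by decide)
  have hp := pv_dict_getD s.toList hpre 'p' (by decide)
  have hz := pv_dict_getD s.toList hpre 'z' (by decide)
  simp only [List.foldl_cons, List.foldl_nil]
  rw [hm, hs, hp, hz, pv_b_nums s.toList hpre 'm', pv_b_nums s.toList hpre 'p',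
      pv_b_nums s.toList hpre 's', pv_b_nums s.toList hpre 'z']
  simp only [List.nil_append, List.append_assoc]
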